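-- pv_equiv track=rewrite | github.com/masmi9/BluJay | scanners/aods/plugins/nist_compliance_reporting/findings_extractor.py | categorize_findings
-- ===== SOURCE A (Python) =====
-- from typing import Dict, List, Any, Optional
--
-- def categorize_findings(findings: List[Dict[str, Any]]) -> Dict[str, List[Dict[str, Any]]]:
--     """Categorize findings by NIST CSF functions."""
--     categories = {"IDENTIFY": [], "PROTECT": [], "DETECT": [], "RESPOND": [], "RECOVER": []}
--
--     for finding in findings:
--         # Map finding categories to NIST functions
--         category = finding.get("category", "").upper()
--
--         if any(term in category for term in ["MANIFEST", "INVENTORY", "ASSET"]):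
--             categories["IDENTIFY"].append(finding)
--         elif any(term in category for term in ["CRYPTO", "AUTH", "ACCESS", "PERMISSION"]):
--             categories["PROTECT"].append(finding)
--         elif any(term in category for term in ["MONITOR", "LOG", "DETECT"]):
--             categories["DETECT"].append(finding)
--         elif any(term in category for term in ["INCIDENT", "RESPONSE"]):
--             categories["RESPOND"].append(finding)
--         else:
--             categories["PROTECT"].append(finding)  # Default to PROTECT
--
--     return categories
-- ===== SOURCE B (Python) =====
-- RULES = [
--     ("IDENTIFY", ["MANIFEST", "INVENTORY", "ASSET"]),
--     ("PROTECT", ["CRYPTO", "AUTH", "ACCESS", "PERMISSION"]),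
--     ("DETECT", ["MONITOR", "LOG", "DETECT"]),
--     ("RESPOND", ["INCIDENT", "RESPONSE"]),
-- ]
--
--
-- def _bucket(finding):
--     """Name of the first NIST CSF bucket whose terms match; PROTECT by default."""
--     category = finding.get("category", "").upper()
--     for name, terms in RULES:
--         if any(term in category for term in terms):
--             return name
--     return "PROTECT"
--
--
-- def categorize_findings(findings):
--     """Categorize findings by NIST CSF functions."""
--     return {
--         name: [f for f in findings if _bucket(f) == name]
--         for name in ("IDENTIFY", "PROTECT", "DETECT", "RESPOND", "RECOVER")
--     }
-- ===== Notes on version B (the rewrite author's own statement) =====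
-- stated objective: simpler
-- what changed: Replaces the single-pass if/elif chain with in-place appends by a declarative rules table plus a pure classifier function, building each bucket as a filter of the input list.
import Mathlib
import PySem

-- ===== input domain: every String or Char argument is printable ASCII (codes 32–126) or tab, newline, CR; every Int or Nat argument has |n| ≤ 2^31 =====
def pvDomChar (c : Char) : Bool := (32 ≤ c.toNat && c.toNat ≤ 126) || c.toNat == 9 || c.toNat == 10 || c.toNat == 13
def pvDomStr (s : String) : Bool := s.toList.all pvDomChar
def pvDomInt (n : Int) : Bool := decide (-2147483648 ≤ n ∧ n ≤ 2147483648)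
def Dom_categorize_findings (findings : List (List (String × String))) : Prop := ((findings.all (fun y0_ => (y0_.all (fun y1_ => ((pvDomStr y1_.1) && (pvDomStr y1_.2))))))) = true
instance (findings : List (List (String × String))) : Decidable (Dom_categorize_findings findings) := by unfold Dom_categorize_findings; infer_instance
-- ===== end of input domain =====

-- B is a simpler decomposition: a declarative rules table + pure classifier, buckets built by filtering.

-- ===== PORT A =====
-- cfM terms finding = any(term in finding.get("category","").upper() for term in terms)
def cfM (terms : List String) (finding : List (String × String)) : Bool :=
  terms.any (fun term => PySem.Str.isIn term (PySem.Str.upper ((PySem.Dict.mk finding).getD "category" "")))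

def cfStep (cats : PySem.Dict String (List (List (String × String))))
    (finding : List (String × String)) : PySem.Dict String (List (List (String × String))) :=
  if cfM ["MANIFEST", "INVENTORY", "ASSET"] finding then
    cats.modify "IDENTIFY" [] (· ++ [finding])
  else if cfM ["CRYPTO", "AUTH", "ACCESS", "PERMISSION"] finding then
    cats.modify "PROTECT" [] (· ++ [finding])
  else if cfM ["MONITOR", "LOG", "DETECT"] finding then
    cats.modify "DETECT" [] (· ++ [finding])
  else if cfM ["INCIDENT", "RESPONSE"] finding then
    cats.modify "RESPOND" [] (· ++ [finding])
  else
    cats.modify "PROTECT" [] (· ++ [finding])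

def categorize_findings (findings : List (List (String × String))) :
    List (String × List (List (String × String))) :=
  let categories : PySem.Dict String (List (List (String × String))) :=
    PySem.Dict.mk [("IDENTIFY", []), ("PROTECT", []), ("DETECT", []), ("RESPOND", []), ("RECOVER", [])]
  (findings.foldl cfStep categories).items

-- ===== PORT B =====
def cfRules : List (String × List String) :=
  [("IDENTIFY", ["MANIFEST", "INVENTORY", "ASSET"]),
   ("PROTECT", ["CRYPTO", "AUTH", "ACCESS", "PERMISSION"]),
   ("DETECT", ["MONITOR", "LOG", "DETECT"]),
   ("RESPOND", ["INCIDENT", "RESPONSE"])]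

-- first rule whose terms match the finding's upper-cased category; default PROTECT
def cfBucket (finding : List (String × String)) : String :=
  match cfRules.find? (fun r => cfM r.2 finding) with
  | some r => r.1
  | none => "PROTECT"

def categorize_findings_alt (findings : List (List (String × String))) :
    List (String × List (List (String × String))) :=
  ["IDENTIFY", "PROTECT", "DETECT", "RESPOND", "RECOVER"].map
    (fun name => (name, findings.filter (fun f => cfBucket f == name)))

-- ===== PRECONDITION & SPEC =====
def Spec_categorize_findings (findings : List (List (String × String))) (out : List (String × List (List (String × String)))) : Prop := out = categorize_findings_alt findings
instance (findings : List (List (String × String))) (out : List (String × List (List (String × String)))) : Decidable (Spec_categorize_findings findings out) := by unfold Spec_categorize_findings; infer_instance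

-- ===== CLAIM (what is proved, stated in full; the proofs are below) =====
def Claim_equal_categorize_findings : Prop := ∀ (findings : List (List (String × String))), Dom_categorize_findings findings → Spec_categorize_findings findings (categorize_findings findings)

-- ===== LEMMAS AND PROOFS =====

-- The generalized loop invariant: folding A's step over any five bucket contents
-- appends exactly the findings B's classifier assigns to each bucket.
theorem cf_loop (fs : List (List (String × String)))
    (l1 l2 l3 l4 l5 : List (List (String × String))) :
    (fs.foldl cfStep (PySem.Dict.mk
        [("IDENTIFY", l1), ("PROTECT", l2), ("DETECT", l3), ("RESPOND", l4), ("RECOVER", l5)])).items =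
      [("IDENTIFY", l1 ++ fs.filter (fun f => cfBucket f == "IDENTIFY")),
       ("PROTECT", l2 ++ fs.filter (fun f => cfBucket f == "PROTECT")),
       ("DETECT", l3 ++ fs.filter (fun f => cfBucket f == "DETECT")),
       ("RESPOND", l4 ++ fs.filter (fun f => cfBucket f == "RESPOND")),
       ("RECOVER", l5 ++ fs.filter (fun f => cfBucket f == "RECOVER"))] := by
  induction fs generalizing l1 l2 l3 l4 l5 with
  | nil => simp
  | cons f fs ih =>
    have hb : cfBucket f =
        (if cfM ["MANIFEST", "INVENTORY", "ASSET"] f then "IDENTIFY"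
         else if cfM ["CRYPTO", "AUTH", "ACCESS", "PERMISSION"] f then "PROTECT"
         else if cfM ["MONITOR", "LOG", "DETECT"] f then "DETECT"
         else if cfM ["INCIDENT", "RESPONSE"] f then "RESPOND"
         else "PROTECT") := by
      unfold cfBucket cfRules
      simp only [List.find?]
      cases cfM ["MANIFEST", "INVENTORY", "ASSET"] f <;>
        cases cfM ["CRYPTO", "AUTH", "ACCESS", "PERMISSION"] f <;>
          cases cfM ["MONITOR", "LOG", "DETECT"] f <;>
            cases cfM ["INCIDENT", "RESPONSE"] f <;> simp
    simp only [List.foldl_cons, List.filter_cons]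
    cases h1 : cfM ["MANIFEST", "INVENTORY", "ASSET"] f <;>
      cases h2 : cfM ["CRYPTO", "AUTH", "ACCESS", "PERMISSION"] f <;>
        cases h3 : cfM ["MONITOR", "LOG", "DETECT"] f <;>
          cases h4 : cfM ["INCIDENT", "RESPONSE"] f <;>
            simp [cfStep, hb, h1, h2, h3, h4, PySem.Dict.modify, PySem.Dict.insert,
              PySem.Dict.getD, PySem.Dict.get?, PySem.Dict.contains, ih]

-- ===== VERDICT (by name: the statement is the Claim_ definition above) =====
theorem categorize_findings_spec : Claim_equal_categorize_findings := by
  intro findings _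
  unfold Spec_categorize_findings categorize_findings categorize_findings_alt
  simp [cf_loop]
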